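-- pv_equiv track=rewrite | github.com/sandeeppalakkal/Algorithmic_Toolbox_UCSD_Coursera | Programming_Challenges_Solutions/week4_divide_and_conquer/2_majority_element/majority_element.py | majority_element_naive
-- ===== SOURCE A (Python) =====
-- def majority_element_naive(a):
--     n = len(a)
--     for i in range(n//2):
--         ni = 1
--         for j in range(i+1,n):
--             if a[j] == a[i]:
--                 ni += 1
--         if ni > (n-i)//2:
--             return a[i],ni
--     return 0,0
-- ===== SOURCE B (Python) =====
-- def majority_element_naive(a):
--     # O(n): total counts once, then one scan maintaining prefix counts;
--     # count of a[i] in a[i:] is total[a[i]] minus its count in a[:i].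
--     n = len(a)
--     total = {}
--     for x in a:
--         total[x] = total.get(x, 0) + 1
--     seen = {}
--     for i in range(n // 2):
--         x = a[i]
--         s = seen.get(x, 0)
--         ni = total[x] - s
--         if ni > (n - i) // 2:
--             return x, ni
--         seen[x] = s + 1
--     return 0, 0
-- ===== Notes on version B (the rewrite author's own statement) =====
-- stated objective: faster
-- what changed: Replaces the quadratic rescan of the suffix at every index with a precomputed total-count dictionary plus a running prefix-count dictionary, so each candidate's suffix count is total minus prefix in O(1).
import Mathlib
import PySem

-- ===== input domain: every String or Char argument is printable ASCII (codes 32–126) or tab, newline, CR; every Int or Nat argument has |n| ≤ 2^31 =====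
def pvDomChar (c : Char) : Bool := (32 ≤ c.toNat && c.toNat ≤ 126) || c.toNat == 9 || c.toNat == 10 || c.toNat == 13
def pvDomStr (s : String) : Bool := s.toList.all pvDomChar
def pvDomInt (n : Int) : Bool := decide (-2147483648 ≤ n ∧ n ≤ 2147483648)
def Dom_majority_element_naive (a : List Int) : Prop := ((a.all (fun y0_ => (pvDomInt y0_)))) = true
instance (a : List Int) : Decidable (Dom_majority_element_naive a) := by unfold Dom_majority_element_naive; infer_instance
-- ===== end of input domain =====

-- B replaces A's quadratic per-index suffix rescan by a total-count dictionary plus a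
-- running prefix-count dictionary (objective: faster, O(n) instead of O(n^2)).

-- ===== PORT A =====
-- indices i, j are always in range (0 ≤ i < n//2 ≤ n, i+1 ≤ j < n), so pyGetD _ _ 0 is exactly a[_]
def majority_element_naive_loop (a : List Int) (n : Int) : List Int → Int × Int
  | [] => (0, 0)
  | i :: rest =>
    let ni := (PySem.List.pyRange (i+1) n 1).foldl
      (fun ni j => if PySem.List.pyGetD a j 0 == PySem.List.pyGetD a i 0 then ni + 1 else ni) 1
    if ni > PySem.Int.floordiv (n - i) 2 then (PySem.List.pyGetD a i 0, ni)
    else majority_element_naive_loop a n rest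

def majority_element_naive (a : List Int) : Int × Int :=
  let n : Int := a.length
  majority_element_naive_loop a n (PySem.List.pyRange 0 (PySem.Int.floordiv n 2) 1)

-- ===== PORT B =====
-- total[x] lookup: x = a[i] occurs in a, so the key is present; getD is exact there
def majority_element_naive_alt_loop (a : List Int) (n : Int) (total : PySem.Dict Int Int) :
    PySem.Dict Int Int → List Int → Int × Int
  | _, [] => (0, 0)
  | seen, i :: rest =>
    let x := PySem.List.pyGetD a i 0
    let s := seen.getD x 0
    let ni := total.getD x 0 - s
    if ni > PySem.Int.floordiv (n - i) 2 then (x, ni)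
    else majority_element_naive_alt_loop a n total (seen.insert x (s + 1)) rest

def majority_element_naive_alt (a : List Int) : Int × Int :=
  let n : Int := a.length
  let total := a.foldl (fun d x => d.insert x (d.getD x 0 + 1)) PySem.Dict.empty
  majority_element_naive_alt_loop a n total PySem.Dict.empty
    (PySem.List.pyRange 0 (PySem.Int.floordiv n 2) 1)

-- ===== PRECONDITION & SPEC =====
def Spec_majority_element_naive (a : List Int) (out : Int × Int) : Prop := out = majority_element_naive_alt a
instance (a : List Int) (out : Int × Int) : Decidable (Spec_majority_element_naive a out) := by unfold Spec_majority_element_naive; infer_instance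

-- ===== CLAIM (what is proved, stated in full; the proofs are below) =====
def Claim_equal_majority_element_naive : Prop := ∀ (a : List Int), Dom_majority_element_naive a → Spec_majority_element_naive a (majority_element_naive a)

-- ===== LEMMAS AND PROOFS =====

-- A's inner loop counts a[i] in a[i:]
theorem aLoop_inner (a : List Int) (i : Int) (h0 : 0 ≤ i) (hlt : i.toNat < a.length) :
    (PySem.List.pyRange (i+1) (a.length : Int) 1).foldl
      (fun ni j => if PySem.List.pyGetD a j 0 == PySem.List.pyGetD a i 0 then ni + 1 else ni) 1
    = 1 + ((a.drop (i.toNat + 1)).count (a[i.toNat]) : Int) := by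
  have h1 : (0:Int) ≤ i + 1 := by omega
  rw [PySem.List.foldl_pyRange_pyGetD' a 0
    (fun acc y => if y == PySem.List.pyGetD a i 0 then acc + 1 else acc) 1 h1]
  rw [PySem.List.foldl_beq_add_one]
  have h2 : (i+1).toNat = i.toNat + 1 := by omega
  rw [h2, PySem.List.pyGetD_eq_getElem a 0 h0 (by omega)]

-- B's ni: total minus prefix count equals 1 + suffix count
theorem counts_split (a : List Int) (k : Nat) (hk : k < a.length) :
    (a.count (a[k]) : Int) - ((a.take k).count (a[k]) : Int)
    = 1 + ((a.drop (k + 1)).count (a[k]) : Int) := by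
  obtain ⟨v, hv⟩ : ∃ v, a[k] = v := ⟨_, rfl⟩
  rw [hv]
  have hd : List.drop k a = v :: List.drop (k + 1) a := by
    rw [← hv]; exact (List.getElem_cons_drop hk).symm
  have hc : a.count v = (a.take k).count v + (a.drop k).count v := by
    conv_lhs => rw [← List.take_append_drop k a]
    exact List.count_append ..
  rw [hd] at hc
  simp at hc
  omega

theorem count_take_succ (a : List Int) (k : Nat) (hk : k < a.length) (y : Int) :
    (a.take (k+1)).count y = (a.take k).count y + (if a[k] == y then 1 else 0) := by
  rw [List.take_add_one]
  rw [List.getElem?_eq_getElem hk]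
  rw [List.count_append]
  congr 1
  by_cases h : a[k] = y
  · subst h; simp
  · simp [h]

-- joint induction over the index range
theorem loop_eq (a : List Int) (seen : PySem.Dict Int Int) (i : Int) (h0 : 0 ≤ i)
    (hseen : ∀ y, seen.getD y 0 = ((a.take i.toNat).count y : Int)) :
    majority_element_naive_loop a (a.length : Int)
        (PySem.List.pyRange i (PySem.Int.floordiv (a.length : Int) 2) 1)
    = majority_element_naive_alt_loop a (a.length : Int)
        (a.foldl (fun d x => d.insert x (d.getD x 0 + 1)) PySem.Dict.empty) seen
        (PySem.List.pyRange i (PySem.Int.floordiv (a.length : Int) 2) 1) := by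
  by_cases hend : PySem.Int.floordiv (a.length : Int) 2 ≤ i
  · rw [PySem.List.pyRange_one_eq_nil hend]
    rfl
  · rw [not_le] at hend
    have hf : PySem.Int.floordiv (a.length : Int) 2 = (a.length : Int) / 2 :=
      PySem.Int.floordiv_eq_ediv_of_pos (by norm_num)
    have hhalf : PySem.Int.floordiv (a.length : Int) 2 ≤ (a.length : Int) := by
      rw [hf]; omega
    have hlen : i.toNat < a.length := by omega
    rw [PySem.List.pyRange_one_cons hend]
    rw [majority_element_naive_loop, majority_element_naive_alt_loop]
    have hx : PySem.List.pyGetD a i 0 = a[i.toNat] :=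
      PySem.List.pyGetD_eq_getElem a 0 h0 (by omega)
    have htot : (a.foldl (fun d x => d.insert x (d.getD x 0 + 1)) PySem.Dict.empty).getD
        (a[i.toNat]) 0 = (a.count (a[i.toNat]) : Int) := by
      rw [PySem.Dict.getD_foldl_insert_add_one]
      simp [PySem.Dict.getD_empty]
    have hni : (PySem.List.pyRange (i+1) (a.length : Int) 1).foldl
        (fun ni j => if PySem.List.pyGetD a j 0 == PySem.List.pyGetD a i 0 then ni + 1 else ni) 1
        = (a.foldl (fun d x => d.insert x (d.getD x 0 + 1)) PySem.Dict.empty).getD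
            (PySem.List.pyGetD a i 0) 0 - seen.getD (PySem.List.pyGetD a i 0) 0 := by
      rw [aLoop_inner a i h0 hlen, hx, htot, hseen]
      exact (counts_split a i.toNat hlen).symm
    simp only [hni]
    split
    · rw [hx]
    · apply loop_eq a _ (i+1) (by omega)
      intro y
      have hstep : (i+1).toNat = i.toNat + 1 := by omega
      rw [hstep, count_take_succ a i.toNat hlen y]
      by_cases hy : PySem.List.pyGetD a i 0 = y
      · rw [← hy, PySem.Dict.getD_insert_self, hseen, hx]
        simp only [beq_self_eq_true, if_true]
        push_cast
        ring
      · rw [PySem.Dict.getD_insert_of_ne seen _ _ (Ne.symm hy), hseen]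
        have hne : (a[i.toNat] == y) = false := by rw [hx] at hy; simp [hy]
        simp [hne]
termination_by (PySem.Int.floordiv (a.length : Int) 2 - i).toNat
decreasing_by omega

-- ===== VERDICT (by name: the statement is the Claim_ definition above) =====
theorem majority_element_naive_spec : Claim_equal_majority_element_naive := by
  intro a _
  unfold Spec_majority_element_naive majority_element_naive majority_element_naive_alt
  exact loop_eq a PySem.Dict.empty 0 le_rfl (by intro y; simp [PySem.Dict.getD_empty])
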